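-- pv_equiv track=rewrite | github.com/jcolinpatrick/kryptos | scripts/transposition/columnar/e_k4_keyword_double_columnar.py | keyword_to_col_order
-- ===== SOURCE A (Python) =====
-- from typing import Dict, List, Tuple
--
-- def keyword_to_col_order(keyword: str) -> List[int]:
--     """Convert keyword to column reading order (alphabetical rank of each letter)."""
--     kw = keyword.upper()
--     indexed = [(ch, i) for i, ch in enumerate(kw)]
--     ranked = sorted(indexed, key=lambda x: (x[0], x[1]))
--     order = [0] * len(kw)
--     for rank, (_, pos) in enumerate(ranked):
--         order[pos] = rank
--     return order
-- ===== SOURCE B (Python) =====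
-- def keyword_to_col_order(keyword):
--     """Convert keyword to column reading order (alphabetical rank of each letter)."""
--     kw = keyword.upper()
--     return [sum(1 for j, cj in enumerate(kw) if (cj, j) < (ci, i))
--             for i, ci in enumerate(kw)]
-- ===== Notes on version B (the rewrite author's own statement) =====
-- stated objective: alternative
-- what changed: Replaces the stable sort + rank-scatter pass with a direct per-position rank computation: each entry is the count of (char, index) pairs lexicographically smaller than its own, so no sorting and no output-array mutation.
import Mathlib
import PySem

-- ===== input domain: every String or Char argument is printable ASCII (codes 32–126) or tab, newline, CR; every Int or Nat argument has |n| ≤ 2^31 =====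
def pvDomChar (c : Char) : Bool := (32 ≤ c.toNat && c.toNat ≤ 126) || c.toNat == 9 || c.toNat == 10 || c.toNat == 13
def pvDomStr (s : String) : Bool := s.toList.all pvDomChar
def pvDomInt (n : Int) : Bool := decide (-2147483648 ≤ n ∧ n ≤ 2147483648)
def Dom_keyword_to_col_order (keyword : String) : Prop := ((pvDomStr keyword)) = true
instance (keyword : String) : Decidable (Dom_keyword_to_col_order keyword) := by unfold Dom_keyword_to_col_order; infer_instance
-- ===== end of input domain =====

-- ===== PORT A =====
-- B replaces A's stable sort + rank-scatter with a direct per-position count of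
-- lexicographically smaller (char, index) pairs; objective: alternative algorithm.
def keyword_to_col_order (keyword : String) : List Int :=
  let kw := PySem.Chars.upper keyword.toList
  let indexed := (PySem.List.enumerate kw 0).map (fun p => (p.2, p.1))
  let ranked := PySem.List.sorted2 indexed (fun x => x.1) (fun x => x.2)
  let order : List Int := List.replicate kw.length 0
  (PySem.List.enumerate ranked 0).foldl (fun acc p => PySem.List.pySetD acc p.2.2 p.1) order

-- ===== PORT B =====
def keyword_to_col_order_alt (keyword : String) : List Int :=
  let kw := PySem.Chars.upper keyword.toList
  (PySem.List.enumerate kw 0).map (fun q =>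
    ((PySem.List.enumerate kw 0).countP
      (fun p => decide (p.2 < q.2 ∨ (p.2 = q.2 ∧ p.1 < q.1))) : Int))

-- ===== PRECONDITION & SPEC =====
def Spec_keyword_to_col_order (keyword : String) (out : List Int) : Prop := out = keyword_to_col_order_alt keyword
instance (keyword : String) (out : List Int) : Decidable (Spec_keyword_to_col_order keyword out) := by unfold Spec_keyword_to_col_order; infer_instance

-- ===== CLAIM (what is proved, stated in full; the proofs are below) =====
def Claim_equal_keyword_to_col_order : Prop := ∀ (keyword : String), Dom_keyword_to_col_order keyword → Spec_keyword_to_col_order keyword (keyword_to_col_order keyword)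

-- ===== LEMMAS AND PROOFS =====

-- sorted2 with two keys is sorted with the lexicographic pair key
theorem pv_sorted2_eq_sorted_lex {a k1t k2t : Type} [LinearOrder k1t] [LinearOrder k2t]
    (xs : List a) (k1 : a → k1t) (k2 : a → k2t) :
    PySem.List.sorted2 xs k1 k2 = PySem.List.sorted xs (fun x => toLex (k1 x, k2 x)) := by
  have hb : (fun x y => decide (k1 x < k1 y) || (!decide (k1 y < k1 x) && decide (k2 x < k2 y)))
      = (fun x y => decide (toLex (k1 x, k2 x) < toLex (k1 y, k2 y))) := by
    funext x y
    rcases lt_trichotomy (k1 x) (k1 y) with h | h | h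
    . simp [h, Prod.Lex.lt_iff]
    . simp [h, Prod.Lex.lt_iff]
    . simp [h, not_lt.mpr (le_of_lt h), Prod.Lex.lt_iff, ne_of_gt h]
  unfold PySem.List.sorted2 PySem.List.sorted
  simp only [show ((false : Bool) = true) = False from by simp]
  rw [if_neg (fun h => h), if_neg (fun h => h)]
  rw [hb]

-- in a strictly key-increasing list, an element's index is the number of smaller keys
theorem pv_rank_eq_countP {a kt : Type} [LinearOrder kt] (key : a → kt) :
    ∀ (r : List a), r.Pairwise (fun x y => key x < key y) ->
    ∀ (k : Nat) (h : k < r.length),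
      r.countP (fun y => decide (key y < key r[k])) = k := by
  intro r hr
  induction r with
  | nil => intro k h; simp at h
  | cons x t ih =>
    obtain ⟨ht, htt⟩ := List.pairwise_cons.mp hr
    intro k h
    cases k with
    | zero =>
      simp only [List.getElem_cons_zero]
      rw [List.countP_eq_zero]
      intro y hy
      rcases List.mem_cons.mp hy with rfl | hy
      . simp
      . simp [not_lt.mpr (le_of_lt (ht y hy))]
    | succ k =>
      have hk : k < t.length := by simpa using h
      have hm : t[k] ∈ t := List.getElem_mem hk
      have h2 := ih htt k hk
      have h3 : key x < key t[k] := ht _ hm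
      simp [h3]
      exact h2

-- the scatter loop: if every update writes g(pos) at pos, the result reads as g
theorem pv_scatter_getElem? (g : Nat → Int) :
    ∀ (l : List (Int × (Char × Int))) (acc : List Int),
    (∀ p ∈ l, 0 ≤ p.2.2 ∧ p.2.2.toNat < acc.length ∧ p.1 = g p.2.2.toNat) ->
    ∀ i : Nat,
      (l.foldl (fun x p => PySem.List.pySetD x p.2.2 p.1) acc)[i]? =
        (if l.any (fun p => p.2.2.toNat == i) then some (g i) else acc[i]?) := by
  intro l
  induction l with
  | nil => intro acc _ i; simp
  | cons p t ih =>
    intro acc hall i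
    obtain ⟨hp0, hplen, hpval⟩ := hall p (by simp)
    have hset : PySem.List.pySetD acc p.2.2 p.1 = acc.set p.2.2.toNat p.1 :=
      PySem.List.pySetD_of_nonneg acc p.1 hp0
    have hlen : (acc.set p.2.2.toNat p.1).length = acc.length := by simp
    have ih' := ih (acc.set p.2.2.toNat p.1)
      (by intro q hq; have := hall q (List.mem_cons_of_mem _ hq); simpa [hlen] using this) i
    simp only [List.foldl_cons, hset, ih']
    by_cases ht : t.any (fun q => q.2.2.toNat == i)
    . simp [ht]
    . by_cases hpi : p.2.2.toNat = i
      . subst hpi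
        simp [ht, hplen, hpval]
      . simp [ht, hpi]

theorem pv_key_inj : Function.Injective (fun x : Char × Int => toLex (x.1, x.2)) := by
  intro x y h
  have := toLex.injective h
  exact Prod.ext_iff.mpr ⟨congrArg Prod.fst this, congrArg Prod.snd this⟩

theorem pv_main (kw : List Char) :
    (PySem.List.enumerate (PySem.List.sorted2 ((PySem.List.enumerate kw 0).map (fun p => (p.2, p.1))) (fun x => x.1) (fun x => x.2)) 0).foldl
        (fun acc p => PySem.List.pySetD acc p.2.2 p.1) (List.replicate kw.length (0:Int))
    = (PySem.List.enumerate kw 0).map (fun q =>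
        ((PySem.List.enumerate kw 0).countP (fun p => decide (p.2 < q.2 ∨ (p.2 = q.2 ∧ p.1 < q.1))) : Int)) := by
  set n := kw.length with hn
  set enum := PySem.List.enumerate kw 0 with henum
  set indexed := enum.map (fun p => (p.2, p.1)) with hidx
  set key : Char × Int → Lex (Char × Int) := fun x => toLex (x.1, x.2) with hkey
  have hlex : PySem.List.sorted2 indexed (fun x => x.1) (fun x => x.2)
      = PySem.List.sorted indexed key := by
    rw [pv_sorted2_eq_sorted_lex]
  set ranked := PySem.List.sorted2 indexed (fun x => x.1) (fun x => x.2) with hrk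
  have hperm : ranked.Perm indexed := by rw [hlex]; exact PySem.List.sorted_perm _ _ _
  -- membership characterisation of indexed
  have hmem : ∀ e ∈ indexed, ∃ m, ∃ _ : m < n, e = (kw[m], (m : Int)) := by
    intro e he
    rcases List.mem_map.mp he with ⟨p, hp, rfl⟩
    rcases (PySem.List.mem_enumerate_iff kw 0 p).mp hp with ⟨m, hm, rfl⟩
    exact ⟨m, hm, by simp⟩
  -- indexed is nodup
  have hnodup : indexed.Nodup := by
    have h1 := PySem.List.pairwise_lt_enumerate kw (0 : Int)
    have h2 : indexed.Pairwise (fun x y : Char × Int => x.2 < y.2) := by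
      rw [hidx]; exact (List.pairwise_map).mpr h1
    exact h2.imp (fun h heq => absurd (heq ▸ h) (lt_irrefl _))
  -- ranked is strictly increasing in key
  have hpw : ranked.Pairwise (fun x y => key x < key y) := by
    have hle : ranked.Pairwise (fun x y => key x ≤ key y) := by
      rw [hlex]; exact PySem.List.sorted_pairwise _ _
    have hne : ranked.Pairwise (· ≠ ·) := (hperm.nodup_iff).mpr hnodup
    exact (hle.and hne).imp (fun h => lt_of_le_of_ne h.1 (fun heq => h.2 (pv_key_inj heq)))
  have hlenr : ranked.length = n := by
    rw [hperm.length_eq, hidx, List.length_map, henum, PySem.List.length_enumerate]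
  -- the value written at position m
  set g : Nat → Int := fun i =>
    ((ranked.countP (fun y => decide (key y < key (kw.getD i 'A', (i : Int))))) : Int) with hg
  have hyp : ∀ p ∈ PySem.List.enumerate ranked 0,
      0 ≤ p.2.2 ∧ p.2.2.toNat < (List.replicate n (0:Int)).length ∧ p.1 = g p.2.2.toNat := by
    intro p hp
    rcases (PySem.List.mem_enumerate_iff ranked 0 p).mp hp with ⟨k, hk, rfl⟩
    rcases hmem ranked[k] (hperm.mem_iff.mp (List.getElem_mem hk)) with ⟨m, hm, hekm⟩
    have h2 : (ranked[k]).2 = (m : Int) := by rw [hekm]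
    refine ⟨by simp [h2], by simp [h2, hm], ?_⟩
    have hgm : g m = (k : Int) := by
      have hgd : kw.getD m 'A' = kw[m] := List.getD_eq_getElem kw 'A' hm
      have : key (kw.getD m 'A', (m : Int)) = key ranked[k] := by rw [hgd, hekm]
      rw [hg]
      simp only [this]
      rw [pv_rank_eq_countP key ranked hpw k hk]
    simp [h2, hgm]
  have hext : ∀ i : Nat,
      ((PySem.List.enumerate ranked 0).foldl (fun acc p => PySem.List.pySetD acc p.2.2 p.1)
        (List.replicate n (0:Int)))[i]?
      = (enum.map (fun q =>
          ((enum.countP (fun p => decide (p.2 < q.2 ∨ (p.2 = q.2 ∧ p.1 < q.1)))) : Int)))[i]? := by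
    intro i
    rw [pv_scatter_getElem? g _ _ hyp i]
    by_cases hin : i < n
    · -- coverage: some pair writes at i
      have hcov : ∃ k, ∃ _ : k < ranked.length, ranked[k] = (kw[i], (i : Int)) := by
        have : (kw[i], (i : Int)) ∈ indexed := by
          rw [hidx]
          refine List.mem_map.mpr ⟨((i : Int), kw[i]), ?_, rfl⟩
          exact (PySem.List.mem_enumerate_iff kw 0 _).mpr ⟨i, hin, by simp⟩
        rcases List.getElem_of_mem (hperm.mem_iff.mpr this) with ⟨k, hk, hkk⟩
        exact ⟨k, hk, hkk⟩
      rcases hcov with ⟨k, hk, hkk⟩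
      have hany : (PySem.List.enumerate ranked 0).any (fun p => p.2.2.toNat == i) = true := by
        refine List.any_eq_true.mpr ⟨((0 : Int) + k, ranked[k]), ?_, ?_⟩
        · exact (PySem.List.mem_enumerate_iff ranked 0 _).mpr ⟨k, hk, rfl⟩
        · simp [hkk]
      rw [if_pos hany]
      -- right side
      rw [List.getElem?_map, henum, PySem.List.getElem?_enumerate, List.getElem?_eq_getElem hin]
      simp only [Option.map_some]
      congr 1
      -- g i = countP enum …
      have hgd : kw.getD i 'A' = kw[i] := List.getD_eq_getElem kw 'A' hin
      simp only [hg]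
      rw [hgd, hperm.countP_eq, hidx, List.countP_map]
      refine congrArg Nat.cast (List.countP_congr ?_)
      intro p _
      simp only [Function.comp, hkey]
      simp [Prod.Lex.lt_iff]
    · -- i out of range: both none
      have hany : (PySem.List.enumerate ranked 0).any (fun p => p.2.2.toNat == i) = false := by
        rw [List.any_eq_false]
        intro p hp
        rcases (PySem.List.mem_enumerate_iff ranked 0 p).mp hp with ⟨k, hk, rfl⟩
        rcases hmem ranked[k] (hperm.mem_iff.mp (List.getElem_mem hk)) with ⟨m, hm, hekm⟩
        have h2 : (ranked[k]).2 = (m : Int) := by rw [hekm]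
        simp [h2]
        omega
      rw [if_neg (by simp [hany])]
      rw [List.getElem?_eq_none (by simp; omega), List.getElem?_eq_none]
      rw [List.length_map, henum, PySem.List.length_enumerate]
      omega
  exact List.ext_getElem? hext

-- ===== VERDICT (by name: the statement is the Claim_ definition above) =====
theorem keyword_to_col_order_spec : Claim_equal_keyword_to_col_order := by
  intro keyword _
  unfold Spec_keyword_to_col_order keyword_to_col_order keyword_to_col_order_alt
  exact pv_main (PySem.Chars.upper keyword.toList)
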